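-- pv_equiv track=rewrite | github.com/JamieJQuinn/IR-GTS | src/pokemon.py | determine_unshuffle_block_order
-- ===== SOURCE A (Python) =====
-- def determine_unshuffle_block_order(pid):
--     block_positions = {
--         'a' : [ 0,0,0,0,0,0,  1,1,2,3,2,3,  1,1,2,3,2,3, 1,1,2,3,2,3 ],
--         'b' : [ 1,1,2,3,2,3,  0,0,0,0,0,0,  2,3,1,1,3,2, 2,3,1,1,3,2 ],
--         'c' : [ 2,3,1,1,3,2,  2,3,1,1,3,2,  0,0,0,0,0,0, 3,2,3,2,1,1 ],
--         'd' : [ 3,2,3,2,1,1,  3,2,3,2,1,1,  3,2,3,2,1,1, 0,0,0,0,0,0 ],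
--     }
--     order = ((pid & 0x3E000) >> 13) % 24
--     return [block[order] for block in block_positions.values()]
-- ===== SOURCE B (Python) =====
-- import itertools
--
-- def determine_unshuffle_block_order(pid):
--     order = ((pid & 0x3E000) >> 13) % 24
--     perm = list(itertools.permutations(range(4)))[order]
--     positions = [0, 0, 0, 0]
--     for slot, block in enumerate(perm):
--         positions[block] = slot
--     return positions
-- ===== Notes on version B (the rewrite author's own statement) =====
-- stated objective: simpler
-- what changed: Replaces the hardcoded per-block position table with runtime generation of the lexicographic permutations of range(4) followed by inversion of the selected permutation.
import Mathlib
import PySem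

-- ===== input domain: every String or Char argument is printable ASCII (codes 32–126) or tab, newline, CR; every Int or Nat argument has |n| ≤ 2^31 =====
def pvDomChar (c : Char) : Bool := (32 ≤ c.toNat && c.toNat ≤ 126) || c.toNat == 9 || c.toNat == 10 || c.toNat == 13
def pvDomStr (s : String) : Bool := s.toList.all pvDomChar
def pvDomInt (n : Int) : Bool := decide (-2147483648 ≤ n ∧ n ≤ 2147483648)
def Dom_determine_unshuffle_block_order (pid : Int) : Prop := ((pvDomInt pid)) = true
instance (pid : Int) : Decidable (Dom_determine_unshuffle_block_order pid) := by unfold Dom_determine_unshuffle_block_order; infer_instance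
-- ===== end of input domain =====

-- B replaces A's hardcoded block-position table by generating the lexicographic
-- permutations of range(4) at runtime and inverting the selected one (objective: simpler).


-- ===== PORT A =====
def determine_unshuffle_block_order (pid : Int) : List Int :=
  let block_positions : PySem.Dict String (List Int) := PySem.Dict.ofList
    [ ("a", [ 0,0,0,0,0,0,  1,1,2,3,2,3,  1,1,2,3,2,3, 1,1,2,3,2,3 ]),
      ("b", [ 1,1,2,3,2,3,  0,0,0,0,0,0,  2,3,1,1,3,2, 2,3,1,1,3,2 ]),
      ("c", [ 2,3,1,1,3,2,  2,3,1,1,3,2,  0,0,0,0,0,0, 3,2,3,2,1,1 ]),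
      ("d", [ 3,2,3,2,1,1,  3,2,3,2,1,1,  3,2,3,2,1,1, 0,0,0,0,0,0 ]) ]
  let order : Int := PySem.Int.mod ((PySem.Int.band pid 0x3E000) >>> (13:Nat)) 24
  -- block[order]: exact — order is nonnegative and below every block's length (proved below)
  block_positions.values.map (fun block => PySem.List.pyGetD block order 0)

-- ===== PORT B =====
def determine_unshuffle_block_order_alt (pid : Int) : List Int :=
  let order : Int := PySem.Int.mod ((PySem.Int.band pid 0x3E000) >>> (13:Nat)) 24
  -- perms[order]: exact — order is nonnegative and below the number of permutations (proved below)
  let perm : List Int :=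
    PySem.List.pyGetD (PySem.List.permutations (PySem.List.pyRange 0 4 1) 4) order []
  -- for slot, block in enumerate(perm): positions[block] = slot
  -- positions[block] = slot: exact, block is always one of 0,1,2,3 (in range)
  (PySem.List.enumerate perm 0).foldl
    (fun positions sb => PySem.List.pySetD positions sb.2 sb.1) [0, 0, 0, 0]

-- ===== PRECONDITION & SPEC =====
def Spec_determine_unshuffle_block_order (pid : Int) (out : List Int) : Prop := out = determine_unshuffle_block_order_alt pid
instance (pid : Int) (out : List Int) : Decidable (Spec_determine_unshuffle_block_order pid out) := by unfold Spec_determine_unshuffle_block_order; infer_instance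

-- ===== CLAIM (what is proved, stated in full; the proofs are below) =====
def Claim_equal_determine_unshuffle_block_order : Prop := ∀ (pid : Int), Dom_determine_unshuffle_block_order pid → Spec_determine_unshuffle_block_order pid (determine_unshuffle_block_order pid)

-- ===== LEMMAS AND PROOFS =====

-- ===== VERDICT (by name: the statement is the Claim_ definition above) =====
theorem determine_unshuffle_block_order_spec : Claim_equal_determine_unshuffle_block_order := by
  intro pid _
  unfold Spec_determine_unshuffle_block_order
  unfold determine_unshuffle_block_order determine_unshuffle_block_order_alt
  have h0 : (0:Int) ≤ PySem.Int.mod ((PySem.Int.band pid 0x3E000) >>> (13:Nat)) 24 :=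
    PySem.Int.mod_nonneg _ (by norm_num)
  have h1 : PySem.Int.mod ((PySem.Int.band pid 0x3E000) >>> (13:Nat)) 24 < 24 :=
    PySem.Int.mod_lt _ (by norm_num)
  generalize hgen : PySem.Int.mod ((PySem.Int.band pid 0x3E000) >>> (13:Nat)) 24 = o at h0 h1 ⊢
  interval_cases o <;> decide
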